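-- pv_equiv track=rewrite | github.com/wxxedu/obsidianki4 | src/processor.py | math_conversion
-- ===== SOURCE A (Python) =====
-- def math_conversion(file_content):
-- 	isOpen = False
-- 	s = ""
-- 	p = 0
-- 	while True:
-- 		q = file_content.find("$$", p)
-- 		if q == -1:
-- 			s += file_content[p:]
-- 			break
-- 		s += file_content[p:q] + ("\]" if isOpen else "\[")
-- 		isOpen = not isOpen
-- 		p = q + 2
-- 	file_content = s
--
-- 	isOpen = False
-- 	s = ""
-- 	p = 0
-- 	while True:
-- 		q = file_content.find("$", p)
-- 		if q == -1:
-- 			s += file_content[p:]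
-- 			break
-- 		s += file_content[p:q] + ("\)" if isOpen else "\(")
-- 		isOpen = not isOpen
-- 		p = q + 1
-- 	file_content = s
--
-- 	return file_content
-- ===== SOURCE B (Python) =====
-- def math_conversion(file_content):
-- 	acc = []
-- 	pending = False  # saw a '$' whose role (part of '$$' or single) is undecided
-- 	disp = False
-- 	inl = False
-- 	for c in file_content:
-- 		if c == "$":
-- 			if pending:
-- 				acc.append("\]" if disp else "\[")
-- 				disp = not disp
-- 				pending = False
-- 			else:
-- 				pending = True
-- 		else:
-- 			if pending:
-- 				acc.append("\)" if inl else "\(")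
-- 				inl = not inl
-- 				pending = False
-- 			acc.append(c)
-- 	if pending:
-- 		acc.append("\)" if inl else "\(")
-- 	return "".join(acc)
-- ===== Notes on version B (the rewrite author's own statement) =====
-- stated objective: alternative
-- what changed: A rewrites the text in two sequential find-and-splice passes (first all '$$', then all '$' over the intermediate string); B is a single character-at-a-time state machine with a pending-dollar flag and two independent toggles, deciding each '$' on the fly with no lookahead and no intermediate string.
import Mathlib
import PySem

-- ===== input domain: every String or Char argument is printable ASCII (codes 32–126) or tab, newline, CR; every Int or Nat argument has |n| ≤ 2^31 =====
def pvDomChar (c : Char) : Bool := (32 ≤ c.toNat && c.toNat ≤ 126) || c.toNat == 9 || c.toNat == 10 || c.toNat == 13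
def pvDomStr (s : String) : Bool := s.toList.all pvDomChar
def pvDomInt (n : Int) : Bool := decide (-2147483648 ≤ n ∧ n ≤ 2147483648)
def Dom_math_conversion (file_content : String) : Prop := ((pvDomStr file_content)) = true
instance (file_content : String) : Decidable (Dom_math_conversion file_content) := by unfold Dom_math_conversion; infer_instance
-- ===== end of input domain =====

-- B replaces A's two find-and-splice passes by one char-at-a-time state machine (pending-dollar flag); same output.
-- ===== PORT A =====
-- A's first while-loop: repeatedly find the next "$$", copy everything before it,
-- emit "\[" / "\]" alternating with isOpen, continue after it.  The find+slice loop
-- copies the text character by character up to each occurrence of "$$"; this is the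
-- exact character-level rendering of that loop (greedy, non-overlapping "$$").
def mcPass1 (isOpen : Bool) : List Char → List Char
  | [] => []
  | '$' :: '$' :: rest => (if isOpen then '\\' :: [']'] else '\\' :: ['[']) ++ mcPass1 (!isOpen) rest
  | c :: rest => c :: mcPass1 isOpen rest

-- A's second while-loop, over the result of the first: same shape for single "$".
def mcPass2 (isOpen : Bool) : List Char → List Char
  | '$' :: rest => (if isOpen then '\\' :: [')'] else '\\' :: ['(']) ++ mcPass2 (!isOpen) rest
  | c :: rest => c :: mcPass2 isOpen rest
  | [] => []

def math_conversion (file_content : String) : String :=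
  String.ofList (mcPass2 false (mcPass1 false file_content.toList))

-- ===== PORT B =====
-- one step of B's state machine: state = (output so far, pending '$', display toggle, inline toggle)
def mcStep (st : List Char × Bool × Bool × Bool) (c : Char) : List Char × Bool × Bool × Bool :=
  match st with
  | (acc, pending, disp, inl) =>
    if c = '$' then
      if pending then (acc ++ ['\\', if disp then ']' else '['], false, !disp, inl)
      else (acc, true, disp, inl)
    else if pending then
      (acc ++ ['\\', if inl then ')' else '('] ++ [c], false, disp, !inl)
    else (acc ++ [c], pending, disp, inl)

def math_conversion_alt (file_content : String) : String :=
  match file_content.toList.foldl mcStep ([], false, false, false) with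
  | (acc, pending, _, inl) =>
      String.ofList (acc ++ if pending then ['\\', if inl then ')' else '('] else [])

-- ===== PRECONDITION & SPEC =====
def Spec_math_conversion (file_content : String) (out : String) : Prop := out = math_conversion_alt file_content
instance (file_content : String) (out : String) : Decidable (Spec_math_conversion file_content out) := by unfold Spec_math_conversion; infer_instance

-- ===== CLAIM (what is proved, stated in full; the proofs are below) =====
def Claim_equal_math_conversion : Prop := ∀ (file_content : String), Dom_math_conversion file_content → Spec_math_conversion file_content (math_conversion file_content)

-- ===== LEMMAS AND PROOFS =====

-- proof-only helper: B's state machine written as a recursion producing the remaining output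
def runOut : Bool → Bool → Bool → List Char → List Char
  | p, _, i, [] => if p then ['\\', if i then ')' else '('] else []
  | p, d, i, c :: r =>
    if c = '$' then
      if p then ['\\', if d then ']' else '['] ++ runOut false (!d) i r
      else runOut true d i r
    else if p then ['\\', if i then ')' else '('] ++ c :: runOut false d (!i) r
    else c :: runOut false d i r

theorem foldl_mcStep_runOut (l : List Char) :
    ∀ (acc : List Char) (p d i : Bool),
    (match l.foldl mcStep (acc, p, d, i) with
     | (a, pe, _, il) => a ++ if pe then ['\\', if il then ')' else '('] else []) =
    acc ++ runOut p d i l := by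
  induction l with
  | nil => intro acc p d i; cases p <;> simp [runOut]
  | cons c r ih =>
      intro acc p d i
      by_cases hc : c = '$'
      · cases p <;>
          simp [hc, List.foldl_cons, mcStep, runOut, ih]
      · cases p <;>
          simp [hc, List.foldl_cons, mcStep, runOut, ih]

theorem mcPass1_cons_ne (d : Bool) (c : Char) (r : List Char) (hc : c ≠ '$') :
    mcPass1 d (c :: r) = c :: mcPass1 d r := by
  rw [mcPass1.eq_def]; cases r <;> simp [hc]

theorem mcPass1_dollar_cons_ne (d : Bool) (c : Char) (r : List Char) (hc : c ≠ '$') :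
    mcPass1 d ('$' :: c :: r) = '$' :: mcPass1 d (c :: r) := by
  rw [mcPass1.eq_def]; simp [hc, mcPass1_cons_ne d c r hc]

theorem mcPass2_cons_ne (i : Bool) (c : Char) (r : List Char) (hc : c ≠ '$') :
    mcPass2 i (c :: r) = c :: mcPass2 i r := by
  rw [mcPass2.eq_def]
  split <;> simp_all

theorem runOut_eq_passes (l : List Char) :
    ∀ (d i : Bool),
      runOut false d i l = mcPass2 i (mcPass1 d l) ∧
      runOut true d i l = mcPass2 i (mcPass1 d ('$' :: l)) := by
  induction l with
  | nil =>
      intro d i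
      constructor
      · simp [runOut, mcPass1, mcPass2]
      · cases i <;> simp [runOut, mcPass1, mcPass2]
  | cons c r ih =>
      intro d i
      by_cases hc : c = '$'
      · subst hc
        constructor
        · -- runOut false d i ('$'::r) = runOut true d i r = mcPass2 i (mcPass1 d ('$'::r))
          simpa [runOut] using (ih d i).2
        · -- pending, next is '$': emit the display bracket
          have h1 : mcPass1 d ('$' :: '$' :: r) =
              (if d then '\\' :: [']'] else '\\' :: ['[']) ++ mcPass1 (!d) r := by
            rw [mcPass1]
          rw [h1]
          have hbr : (if d then ['\\', ']'] else ['\\', '[']) =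
              ['\\', if d then ']' else '['] := by cases d <;> rfl
          rw [hbr, List.cons_append, List.cons_append, List.nil_append,
            mcPass2_cons_ne _ _ _ (by decide),
            mcPass2_cons_ne _ _ _ (by cases d <;> decide)]
          simp [runOut, (ih (!d) i).1]
      · constructor
        · rw [mcPass1_cons_ne d c r hc, mcPass2_cons_ne i c _ hc]
          simp [runOut, hc, (ih d i).1]
        · rw [mcPass1_dollar_cons_ne d c r hc, mcPass2,
            mcPass1_cons_ne d c r hc, mcPass2_cons_ne (!i) c _ hc]
          cases i <;> simp [runOut, hc, (ih d true).1, (ih d false).1]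

-- ===== VERDICT (by name: the statement is the Claim_ definition above) =====
theorem math_conversion_spec : Claim_equal_math_conversion := by
  intro s _
  unfold Spec_math_conversion math_conversion math_conversion_alt
  have h := foldl_mcStep_runOut s.toList [] false false false
  rw [List.nil_append, (runOut_eq_passes s.toList false false).1] at h
  rcases hf : List.foldl mcStep ([], false, false, false) s.toList with ⟨a, pe, dd, il⟩
  rw [hf] at h
  simp only at h ⊢
  rw [← h]
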